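-- pv_equiv track=rewrite | github.com/jakemckenzie/explode-bootdotdev | src/mypackage/transforms/block_to_block_type.py | is_heading_block
-- ===== SOURCE A (Python) =====
-- def is_heading_block(block: str) -> bool:
--     if not block:
--         return False
--
--     count = 0
--     for char in block:
--         if char == "#":
--             count += 1
--         else:
--             break
--
--     if 1 <= count <= 6 and len(block) > count and block[count] == " ":
--         return True
--     return False
-- ===== SOURCE B (Python) =====
-- def is_heading_block(block: str) -> bool:
--     head, sep, _ = block.partition(" ")
--     return sep == " " and 1 <= len(head) <= 6 and all(c == "#" for c in head)
-- ===== Notes on version B (the rewrite author's own statement) =====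
-- stated objective: idiomatic
-- what changed: Replaces the manual counting loop with a break plus a separate length/index guard by partitioning the string at its first space and validating the part before it (nonempty, all '#', length at most 6).
import Mathlib
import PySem

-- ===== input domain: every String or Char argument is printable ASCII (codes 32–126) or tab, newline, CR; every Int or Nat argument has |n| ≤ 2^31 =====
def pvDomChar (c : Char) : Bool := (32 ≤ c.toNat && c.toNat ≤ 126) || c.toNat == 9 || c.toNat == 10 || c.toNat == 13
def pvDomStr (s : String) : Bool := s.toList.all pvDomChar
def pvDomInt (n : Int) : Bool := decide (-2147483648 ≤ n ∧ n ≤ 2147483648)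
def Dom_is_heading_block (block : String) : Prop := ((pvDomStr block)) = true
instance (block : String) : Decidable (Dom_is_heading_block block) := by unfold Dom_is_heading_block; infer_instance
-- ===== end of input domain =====

-- B partitions the string at its first space and validates the head, instead of A's
-- counting loop with a break plus a length/index guard; same cost, more idiomatic.

-- ===== PORT A =====
-- the `for char in block: … break` loop of A: number of leading '#' characters
-- (count is a Python int that stays ≥ 0, so it is carried as a Nat; l[count]?
-- is exact for the in-range, nonnegative index Python's guarded block[count] uses)
def pvCountHash : List Char → Nat
  | [] => 0
  | c :: t => if c = '#' then pvCountHash t + 1 else 0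

def is_heading_block (block : String) : Bool :=
  let l := block.toList
  if l.isEmpty then false
  else
    let count := pvCountHash l
    if 1 ≤ count ∧ count ≤ 6 ∧ l.length > count ∧ l[count]? = some ' ' then true
    else false

-- ===== PORT B =====
-- block.partition(" "): head = takeWhile (≠ ' '), sep == " " iff a space occurs,
-- i.e. the dropWhile remainder is nonempty (its first element is then the space)
def is_heading_block_alt (block : String) : Bool :=
  let l := block.toList
  let head := l.takeWhile (fun c => c ≠ ' ')
  let rest := l.dropWhile (fun c => c ≠ ' ')
  (!rest.isEmpty) && decide (1 ≤ head.length ∧ head.length ≤ 6)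
    && head.all (fun c => c = '#')

-- ===== PRECONDITION & SPEC =====
def Spec_is_heading_block (block : String) (out : Bool) : Prop := out = is_heading_block_alt block
instance (block : String) (out : Bool) : Decidable (Spec_is_heading_block block out) := by unfold Spec_is_heading_block; infer_instance

-- ===== CLAIM (what is proved, stated in full; the proofs are below) =====
def Claim_equal_is_heading_block : Prop := ∀ (block : String), Dom_is_heading_block block → Spec_is_heading_block block (is_heading_block block)

-- ===== LEMMAS AND PROOFS =====

theorem pvCountHash_eq_takeWhile (l : List Char) :
    pvCountHash l = (l.takeWhile (fun c => decide (c = '#'))).length := by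
  induction l with
  | nil => rfl
  | cons c t ih =>
    by_cases h : c = '#' <;> simp [pvCountHash, h, ih]

-- if everything before the first space is '#', the two takeWhiles coincide
theorem tw_eq (l : List Char)
    (h : ∀ x ∈ l.takeWhile (fun c => !decide (c = ' ')), x = '#') :
    l.takeWhile (fun c => decide (c = '#')) = l.takeWhile (fun c => !decide (c = ' ')) := by
  induction l with
  | nil => rfl
  | cons c t ih =>
    by_cases hs : c = ' '
    · simp [hs]
    · simp [hs] at h ⊢
      simp [h.1, ih h.2]

-- if some char before the first space is not '#', A's indexed char is not a space
theorem bad_head (l : List Char)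
    (h : ∃ x ∈ l.takeWhile (fun c => !decide (c = ' ')), ¬ x = '#') :
    (l.dropWhile (fun c => decide (c = '#'))).head? ≠ some ' ' := by
  induction l with
  | nil => simp at h
  | cons c t ih =>
    by_cases hs : c = ' '
    · simp [hs] at h
    · simp [hs] at h
      by_cases hh : c = '#'
      · have h' : ∃ x ∈ t.takeWhile (fun c => !decide (c = ' ')), ¬ x = '#' := by
          rcases h with hc | h'
          · exact absurd hh hc
          · exact h'
        simpa [hh] using ih h'
      · simp [List.dropWhile_cons, hh, hs]

theorem head?_dropWhile_ne_space (l : List Char)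
    (h : l.dropWhile (fun c => !decide (c = ' ')) ≠ []) :
    (l.dropWhile (fun c => !decide (c = ' '))).head? = some ' ' := by
  induction l with
  | nil => simp at h
  | cons c t ih =>
    by_cases hs : c = ' '
    · simp [hs]
    · simp only [List.dropWhile_cons, hs] at h ⊢
      simp only [decide_false, Bool.not_false, if_true] at h ⊢
      · exact ih (by simpa using h)

theorem getElem?_at_takeWhile_length (l : List Char) (p : Char → Bool) :
    l[(l.takeWhile p).length]? = (l.dropWhile p).head? := by
  have h := List.takeWhile_append_dropWhile (p := p) (l := l)
  calc l[(l.takeWhile p).length]?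
      = (l.takeWhile p ++ l.dropWhile p)[(l.takeWhile p).length]? := by rw [h]
    _ = (l.dropWhile p).head? := by
        rw [List.getElem?_append_right (le_refl _)]
        simp [List.head?_eq_getElem?]

theorem len_split (l : List Char) (p : Char → Bool) :
    (l.takeWhile p).length + (l.dropWhile p).length = l.length := by
  have h := congrArg List.length (List.takeWhile_append_dropWhile (p := p) (l := l))
  rwa [List.length_append] at h

theorem main_eq (l : List Char) :
    (if l.isEmpty then false
     else if 1 ≤ pvCountHash l ∧ pvCountHash l ≤ 6 ∧ l.length > pvCountHash l ∧
              l[pvCountHash l]? = some ' ' then true else false)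
    = ((!(l.dropWhile (fun c => c ≠ ' ')).isEmpty)
        && decide (1 ≤ (l.takeWhile (fun c => c ≠ ' ')).length ∧
                   (l.takeWhile (fun c => c ≠ ' ')).length ≤ 6)
        && (l.takeWhile (fun c => c ≠ ' ')).all (fun c => c = '#')) := by
  rw [Bool.eq_iff_iff]
  by_cases hall : ∀ x ∈ l.takeWhile (fun c => !decide (c = ' ')), x = '#'
  · have hcnt : pvCountHash l = (l.takeWhile (fun c => !decide (c = ' '))).length := by
      rw [pvCountHash_eq_takeWhile, tw_eq l hall]
    have hget : l[pvCountHash l]? = (l.dropWhile (fun c => !decide (c = ' '))).head? := by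
      rw [hcnt]; exact getElem?_at_takeWhile_length l _
    by_cases hr : l.dropWhile (fun c => !decide (c = ' ')) = []
    · have hgetnone : l[pvCountHash l]? = none := by rw [hget, hr]; rfl
      simp [hr, hgetnone]
    · have hhead := head?_dropWhile_ne_space l hr
      have hgetv : l[pvCountHash l]? = some ' ' := by rw [hget, hhead]
      have hdpos : 0 < (l.dropWhile (fun c => !decide (c = ' '))).length :=
        List.length_pos_of_ne_nil hr
      have hlen := len_split l (fun c => !decide (c = ' '))
      have hl : l ≠ [] := by
        intro he; subst he; exact hr rfl
      rw [hcnt] at hgetv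
      simp [hl, hr, hcnt]
      constructor
      · rintro ⟨h1, h2, -, -⟩
        exact ⟨⟨h1, h2⟩, hall⟩
      · rintro ⟨⟨h1, h2⟩, -⟩
        exact ⟨h1, h2, by omega, hgetv⟩
  · have hex : ∃ x ∈ l.takeWhile (fun c => !decide (c = ' ')), ¬ x = '#' := by
      simpa using hall
    have hbad := bad_head l hex
    have hget : l[pvCountHash l]? = (l.dropWhile (fun c => decide (c = '#'))).head? := by
      rw [pvCountHash_eq_takeWhile]; exact getElem?_at_takeWhile_length l _
    have hne : l[pvCountHash l]? ≠ some ' ' := by rw [hget]; exact hbad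
    simp [hne, hex]

-- ===== VERDICT (by name: the statement is the Claim_ definition above) =====
theorem is_heading_block_spec : Claim_equal_is_heading_block := by
  intro block _
  unfold Spec_is_heading_block is_heading_block is_heading_block_alt
  exact main_eq block.toList
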